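-- pv_equiv track=rewrite | github.com/BANGBANGROX/Python-Coding | CodingProblems/partition_array_to_minimize_xor.py | min_xor
-- ===== SOURCE A (Python) =====
-- def min_xor(nums: list[int], k: int) -> int:
--     n: int = len(nums)
--     dp: list[list[int]] = [[-1 for _ in range(k + 1)] for _ in range(n)]
--     max_value: int = 10 ** 12
--
--     def min_xor_handler(idx: int, parts_left: int) -> int:
--         if idx == n and parts_left == 0:
--             return 0
--
--         if idx == n or parts_left == 0:
--             return max_value
--
--         if dp[idx][parts_left] != -1:
--             return dp[idx][parts_left]
--
--         current_xor = 0
--         result = max_value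
--
--         for i in range(idx, n - parts_left + 1):
--             current_xor ^= nums[i]
--             next_xor = min_xor_handler(i + 1, parts_left - 1)
--             result = min(result, max(current_xor, next_xor))
--
--         dp[idx][parts_left] = result
--
--         return result
--
--     return min_xor_handler(0, k)
-- ===== SOURCE B (Python) =====
-- def min_xor(nums: list[int], k: int) -> int:
--     n = len(nums)
--     INF = 10 ** 12
--
--     def best(cur, p, idx):
--         cx = 0
--         b = INF
--         for i in range(idx, n - p + 1):
--             cx ^= nums[i]
--             b = min(b, max(cx, cur[i + 1]))
--         return b
--
--     cur = [INF] * n + [0]          # dp row for 0 parts: only the empty suffix is partitionable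
--     for p in range(1, k + 1):
--         cur = [best(cur, p, idx) for idx in range(n + 1)]
--     return cur[0]
-- ===== Notes on version B (the rewrite author's own statement) =====
-- stated objective: alternative
-- what changed: Replaced the top-down memoized recursion (mutable 2D memo table with -1 sentinels, recursive handler) by a bottom-up DP that iterates over the number of parts, keeping only one row cur[idx] = best value for nums[idx:] with p parts and rebuilding it per p.
-- outside the precondition, e.g. on min_xor([], -1): A returns 1000000000000, B returns 0
import Mathlib
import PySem

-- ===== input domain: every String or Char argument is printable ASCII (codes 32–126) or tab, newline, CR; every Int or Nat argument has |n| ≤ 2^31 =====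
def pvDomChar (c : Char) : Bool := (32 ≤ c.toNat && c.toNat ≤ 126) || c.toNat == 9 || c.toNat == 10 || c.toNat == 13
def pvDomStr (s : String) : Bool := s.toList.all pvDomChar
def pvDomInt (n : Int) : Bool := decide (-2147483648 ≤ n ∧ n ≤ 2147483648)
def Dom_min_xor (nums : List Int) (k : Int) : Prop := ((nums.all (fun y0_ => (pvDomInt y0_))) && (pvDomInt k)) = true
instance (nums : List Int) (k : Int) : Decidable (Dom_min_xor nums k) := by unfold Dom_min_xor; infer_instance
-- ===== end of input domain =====

-- B replaces A's top-down memoized recursion by a bottom-up DP over the number of parts that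
-- keeps a single row; equivalence of the RETURN value is proved for k ≥ 0 (Pre_).

-- ===== PORT A =====
-- A's memo dp[idx][parts] (a 2D list with sentinel -1) is ported as a Dict defaulting to -1;
-- exact, since every index A reads/writes is in range when k ≥ 0 (Pre_). The recursion is
-- given fuel k.toNat + 1: each recursive call decreases parts_left by 1, so it never runs out.
def pvHandlerA (nums : List Int) : Nat → Int → Int → PySem.Dict (Int × Int) Int → Int × PySem.Dict (Int × Int) Int
  | 0, _, _, dp => (0, dp)  -- fuel exhausted: unreachable from min_xor
  | fuel+1, idx, parts, dp =>
    let n : Int := nums.length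
    if idx = n ∧ parts = 0 then (0, dp)
    else if idx = n ∨ parts = 0 then ((10:Int) ^ 12, dp)
    else if dp.getD (idx, parts) (-1) ≠ -1 then (dp.getD (idx, parts) (-1), dp)
    else
      let st := (PySem.List.pyRange idx (n - parts + 1) 1).foldl
        (fun (st : Int × Int × PySem.Dict (Int × Int) Int) i =>
          let cx := PySem.Int.bxor st.1 (PySem.List.pyGetD nums i 0)
          let r := pvHandlerA nums fuel (i + 1) (parts - 1) st.2.2
          (cx, min st.2.1 (max cx r.1), r.2))
        (0, (10:Int) ^ 12, dp)
      (st.2.1, st.2.2.insert (idx, parts) st.2.1)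

def min_xor (nums : List Int) (k : Int) : Int :=
  (pvHandlerA nums (k.toNat + 1) 0 k PySem.Dict.empty).1

-- ===== PORT B =====
-- best cur p idx: the inner accumulation loop of Source B
def pvBestB (nums : List Int) (cur : List Int) (p : Int) (idx : Int) : Int :=
  ((PySem.List.pyRange idx ((nums.length : Int) - p + 1) 1).foldl
    (fun (st : Int × Int) i =>
      let cx := PySem.Int.bxor st.1 (PySem.List.pyGetD nums i 0)
      (cx, min st.2 (max cx (PySem.List.pyGetD cur (i + 1) 0))))
    (0, (10:Int) ^ 12)).2

def min_xor_alt (nums : List Int) (k : Int) : Int :=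
  let cur := List.replicate nums.length ((10:Int) ^ 12) ++ [0]
  PySem.List.pyGetD
    ((PySem.List.pyRange 1 (k + 1) 1).foldl
      (fun cur p => (PySem.List.pyRange 0 ((nums.length : Int) + 1) 1).map (pvBestB nums cur p))
      cur)
    0 0

-- ===== PRECONDITION & SPEC =====
-- Pre_ excludes k < 0: there A raises IndexError for a nonempty list (dp rows are empty), and on
-- the empty list the query (negative part count) is meaningless, so A's sentinel 10**12 and B's 0
-- are equally defensible accidental answers.
def Pre_min_xor (nums : List Int) (k : Int) : Prop := 0 ≤ k
instance (nums : List Int) (k : Int) : Decidable (Pre_min_xor nums k) := by unfold Pre_min_xor; infer_instance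
def pvWitness_min_xor : List Int × Int := ([1, 2, 3], 2)

def Spec_min_xor (nums : List Int) (k : Int) (out : Int) : Prop := out = min_xor_alt nums k
instance (nums : List Int) (k : Int) (out : Int) : Decidable (Spec_min_xor nums k out) := by unfold Spec_min_xor; infer_instance

-- ===== CLAIM (what is proved, stated in full; the proofs are below) =====
def Claim_equal_min_xor : Prop := ∀ (nums : List Int) (k : Int), Dom_min_xor nums k → Pre_min_xor nums k → Spec_min_xor nums k (min_xor nums k)

-- ===== LEMMAS AND PROOFS =====

-- The pure recurrence both programs compute: pvF xs p idx = min over partitions of xs[idx:]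
-- into exactly p parts of the maximal segment XOR (10^12 if impossible).
def pvF (xs : List Int) : Nat → Nat → Int
  | 0, idx => if idx = xs.length then 0 else (10:Int) ^ 12
  | p+1, idx =>
    ((List.range (xs.length + 1 - (p+1) - idx)).foldl
      (fun (st : Int × Int) j =>
        let cx := PySem.Int.bxor st.1 (xs.getD (idx + j) 0)
        (cx, min st.2 (max cx (pvF xs p (idx + j + 1)))))
      (0, (10:Int) ^ 12)).2


-- invariant of A's memo table: every stored value is either the -1 sentinel or the true answer
def pvInvA (xs : List Int) (dp : PySem.Dict (Int × Int) Int) : Prop :=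
  ∀ (i q : Nat), dp.getD ((i : Int), (q : Int)) (-1) = -1 ∨ dp.getD ((i : Int), (q : Int)) (-1) = pvF xs q i

-- a fold whose state carries an extra component (A's dp) projects onto the pure fold
theorem pvFoldProj {δ : Type} (fA : Int × Int × δ → Nat → Int × Int × δ)
    (fS : Int × Int → Nat → Int × Int) (Inv : δ → Prop) :
    ∀ (l : List Nat),
      (∀ cx res d j, j ∈ l → Inv d →
        ((fA (cx, res, d) j).1, (fA (cx, res, d) j).2.1) = fS (cx, res) j ∧ Inv (fA (cx, res, d) j).2.2) →
      ∀ cx res d, Inv d →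
        ((l.foldl fA (cx, res, d)).1, (l.foldl fA (cx, res, d)).2.1) = l.foldl fS (cx, res) ∧
          Inv (l.foldl fA (cx, res, d)).2.2 := by
  intro l
  induction l with
  | nil => intro _ cx res d hd; exact ⟨rfl, hd⟩
  | cons x t ih =>
    intro h cx res d hd
    have hx := h cx res d x (List.mem_cons_self) hd
    have ih' := ih (fun cx res d j hj => h cx res d j (List.mem_cons_of_mem _ hj)) (fA (cx, res, d) x).1
      (fA (cx, res, d) x).2.1 (fA (cx, res, d) x).2.2 hx.2
    simp only [List.foldl_cons]
    rw [hx.1] at ih'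
    exact ih'

theorem pvHandlerA_correct (xs : List Int) :
    ∀ (fuel p idx : Nat) (dp : PySem.Dict (Int × Int) Int), p < fuel → pvInvA xs dp →
      (pvHandlerA xs fuel (idx : Int) (p : Int) dp).1 = pvF xs p idx ∧
        pvInvA xs (pvHandlerA xs fuel (idx : Int) (p : Int) dp).2 := by
  intro fuel
  induction fuel with
  | zero => intro p idx dp hp; omega
  | succ fuel ih =>
    intro p idx dp hp hInv
    simp only [pvHandlerA]
    split_ifs with h1 h2 h3
    · -- idx == n and parts == 0
      have hp0 : p = 0 := by omega
      have hidx : idx = xs.length := by omega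
      subst hp0 hidx
      exact ⟨by simp [pvF], hInv⟩
    · -- idx == n or parts == 0 (but not both)
      refine ⟨?_, hInv⟩
      rcases h2 with h2 | h2
      · have hidx : idx = xs.length := by omega
        subst hidx
        cases p with
        | zero => exact absurd ⟨h2, by simp⟩ h1
        | succ q =>
          have hcnt : xs.length + 1 - (q + 1) - xs.length = 0 := by omega
          simp [pvF]
      · have hp0 : p = 0 := by omega
        subst hp0
        have hidx : idx ≠ xs.length := by
          intro hc; exact h1 ⟨by exact_mod_cast congrArg (Nat.cast : Nat → Int) hc, h2⟩
        simp [pvF, hidx]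
    · -- memo hit
      rcases hInv idx p with hm | hm
      · exact absurd hm h3
      · exact ⟨hm, hInv⟩
    · -- compute the loop
      have hpne : p ≠ 0 := by
        intro hc; subst hc; exact h2 (Or.inr rfl)
      obtain ⟨q, rfl⟩ := Nat.exists_eq_succ_of_ne_zero hpne
      simp only [PySem.List.pyRange_one, List.foldl_map]
      push_cast
      have hcnt : ((xs.length : Int) - ((q : Int) + 1) + 1 - (idx : Int)).toNat
          = xs.length + 1 - (q + 1) - idx := by omega
      rw [hcnt]
      have hproj := pvFoldProj
        (fun (x : Int × Int × PySem.Dict (Int × Int) Int) (y : Nat) =>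
          (PySem.Int.bxor x.1 (PySem.List.pyGetD xs ((idx : Int) + (y : Int)) 0),
            min x.2.1
              (max (PySem.Int.bxor x.1 (PySem.List.pyGetD xs ((idx : Int) + (y : Int)) 0))
                (pvHandlerA xs fuel ((idx : Int) + (y : Int) + 1) ((q : Int) + 1 - 1) x.2.2).1),
            (pvHandlerA xs fuel ((idx : Int) + (y : Int) + 1) ((q : Int) + 1 - 1) x.2.2).2))
        (fun (st : Int × Int) (j : Nat) =>
          (PySem.Int.bxor st.1 (xs.getD (idx + j) 0),
            min st.2 (max (PySem.Int.bxor st.1 (xs.getD (idx + j) 0)) (pvF xs q (idx + j + 1)))))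
        (pvInvA xs) (List.range (xs.length + 1 - (q + 1) - idx))
        (by
          intro cx res d j hj hd
          have harg1 : (idx : Int) + (j : Int) = ((idx + j : Nat) : Int) := by push_cast; ring
          have harg2 : (idx : Int) + (j : Int) + 1 = ((idx + j + 1 : Nat) : Int) := by push_cast; ring
          have harg3 : ((q : Int) + 1) - 1 = ((q : Nat) : Int) := by ring
          have hrec := ih q (idx + j + 1) d (by omega) hd
          refine ⟨?_, ?_⟩
          · show (PySem.Int.bxor cx (PySem.List.pyGetD xs ((idx : Int) + (j : Int)) 0),
                min res
                  (max (PySem.Int.bxor cx (PySem.List.pyGetD xs ((idx : Int) + (j : Int)) 0))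
                    (pvHandlerA xs fuel ((idx : Int) + (j : Int) + 1) ((q : Int) + 1 - 1) d).1))
              = (PySem.Int.bxor cx (xs.getD (idx + j) 0),
                min res (max (PySem.Int.bxor cx (xs.getD (idx + j) 0)) (pvF xs q (idx + j + 1))))
            rw [harg2, harg3, harg1, PySem.List.pyGetD_natCast, hrec.1]
          · show pvInvA xs (pvHandlerA xs fuel ((idx : Int) + (j : Int) + 1) ((q : Int) + 1 - 1) d).2
            rw [harg2, harg3]
            exact hrec.2)
        0 (1000000000000 : Int) dp hInv
      have hres := congrArg Prod.snd hproj.1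
      have hspec : ((List.range (xs.length + 1 - (q + 1) - idx)).foldl
          (fun (st : Int × Int) (j : Nat) =>
            (PySem.Int.bxor st.1 (xs.getD (idx + j) 0),
              min st.2 (max (PySem.Int.bxor st.1 (xs.getD (idx + j) 0)) (pvF xs q (idx + j + 1)))))
          (0, (1000000000000 : Int))).2 = pvF xs (q + 1) idx := by
        simp only [pvF]
        norm_num
      refine ⟨hres.trans hspec, ?_⟩
      intro i q'
      rw [PySem.Dict.getD_insert]
      split_ifs with hk2
      · right
        have h1 := congrArg Prod.fst hk2
        have h2 := congrArg Prod.snd hk2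
        simp only at h1 h2
        have hi : i = idx := by exact_mod_cast h1
        have hq' : q' = q + 1 := by exact_mod_cast h2
        rw [hi, hq']
        exact hres.trans hspec
      · exact hproj.2 i q'

-- ===== B-side =====
theorem pvBestB_correct (xs : List Int) (p idx : Nat) :
    pvBestB xs ((List.range (xs.length + 1)).map (fun i => pvF xs p i)) ((p : Int) + 1) (idx : Int)
      = pvF xs (p + 1) idx := by
  unfold pvBestB
  have hcnt : (((xs.length : Int) - ((p : Int) + 1) + 1) - (idx : Int)).toNat
      = xs.length + 1 - (p + 1) - idx := by push_cast; omega
  rw [PySem.List.pyRange_one, List.foldl_map, hcnt]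
  have hcong : ∀ (st : Int × Int) (j : Nat), j ∈ List.range (xs.length + 1 - (p + 1) - idx) →
      (let cx := PySem.Int.bxor st.1 (PySem.List.pyGetD xs ((idx : Int) + j) 0)
       (cx, min st.2 (max cx (PySem.List.pyGetD
         ((List.range (xs.length + 1)).map (fun i => pvF xs p i)) ((idx : Int) + j + 1) 0))))
      = (let cx := PySem.Int.bxor st.1 (xs.getD (idx + j) 0)
         (cx, min st.2 (max cx (pvF xs p (idx + j + 1))))) := by
    intro st j hj
    rw [List.mem_range] at hj
    have harg1 : (idx : Int) + (j : Int) = ((idx + j : Nat) : Int) := by push_cast; ring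
    have harg2 : (idx : Int) + (j : Int) + 1 = ((idx + j + 1 : Nat) : Int) := by push_cast; ring
    have hlt : idx + j + 1 < xs.length + 1 := by omega
    simp only [harg2, PySem.List.pyGetD_natCast]
    rw [PySem.List.getD_map_range _ _ _ _ hlt]
    simp only [harg1, PySem.List.pyGetD_natCast]
  rw [PySem.List.foldl_congr_mem _ _ _ _ (fun acc x hx => hcong acc x hx)]
  simp [pvF]

theorem pvRowB_correct (xs : List Int) (p : Nat) :
    (PySem.List.pyRange 0 ((xs.length : Int) + 1) 1).map
        (pvBestB xs ((List.range (xs.length + 1)).map (fun i => pvF xs p i)) ((p : Int) + 1))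
      = (List.range (xs.length + 1)).map (fun i => pvF xs (p + 1) i) := by
  rw [PySem.List.pyRange_one]
  have hcnt : (((xs.length : Int) + 1) - 0).toNat = xs.length + 1 := by omega
  rw [hcnt, List.map_map]
  refine List.map_congr_left ?_
  intro j hj
  show pvBestB xs _ _ (0 + (j : Int)) = _
  rw [zero_add]
  exact pvBestB_correct xs p j

theorem pvOuterB (xs : List Int) :
    ∀ (m : Nat),
      (List.range m).foldl
        (fun (cur : List Int) (j : Nat) => (PySem.List.pyRange 0 ((xs.length : Int) + 1) 1).map
          (pvBestB xs cur (1 + (j : Int))))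
        (List.replicate xs.length ((10 : Int) ^ 12) ++ [0])
      = (List.range (xs.length + 1)).map (fun i => pvF xs m i) := by
  intro m
  induction m with
  | zero =>
    simp only [List.range_zero, List.foldl_nil]
    apply List.ext_getElem
    · simp
    · intro i h1 h2
      simp only [List.getElem_map, List.getElem_range]
      by_cases hi : i < xs.length
      · rw [List.getElem_append_left (by simpa using hi)]
        simp [pvF, Nat.ne_of_lt hi]
      · have hieq : i = xs.length := by simp at h1; omega
        subst hieq
        rw [List.getElem_append_right (by simp)]
        simp [pvF]
  | succ m ih =>
    rw [List.range_succ, List.foldl_append, ih, List.foldl_cons, List.foldl_nil]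
    have h1 : 1 + (m : Int) = (m : Int) + 1 := by ring
    rw [h1]
    exact pvRowB_correct xs m

theorem pvAltB (xs : List Int) (k : Int) (hk : 0 ≤ k) :
    min_xor_alt xs k = pvF xs k.toNat 0 := by
  unfold min_xor_alt
  have hout : PySem.List.pyRange 1 (k + 1) 1
      = (List.range k.toNat).map (fun (j : Nat) => 1 + (j : Int)) := by
    rw [PySem.List.pyRange_one]
    congr 2
    omega
  simp only [hout, List.foldl_map]
  rw [pvOuterB xs k.toNat, PySem.List.pyGetD_zero,
    PySem.List.getD_map_range _ _ _ _ (by omega)]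

-- ===== VERDICT =====
theorem min_xor_spec : Claim_equal_min_xor := by
  intro nums k _ hk
  unfold Spec_min_xor
  unfold Pre_min_xor at hk
  obtain ⟨m, rfl⟩ : ∃ m : Nat, k = (m : Int) := ⟨k.toNat, (Int.toNat_of_nonneg hk).symm⟩
  have hA := pvHandlerA_correct nums (m + 1) m 0 PySem.Dict.empty (by omega)
    (by intro i q; left; simp [PySem.Dict.getD_empty])
  unfold min_xor
  have hm : ((m : Int)).toNat = m := by simp
  rw [hm, show (0 : Int) = ((0 : Nat) : Int) from rfl, hA.1,
    pvAltB nums m (by positivity), hm]
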